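-- pv_equiv track=rewrite | github.com/rshest/advent2020 | python/day09.py | get_first_non_sum
-- ===== SOURCE A (Python) =====
-- import bisect
--
-- def get_first_non_sum(nums, k):
--     window = sorted(nums[:k])
--     for i in range(k, len(nums)):
--         l, r = 0, k - 1
--         s = nums[i]
--         while l < r:
--             cur_sum = window[l] + window[r]
--             if cur_sum < s:
--                 l += 1
--             elif cur_sum > s:
--                 r -= 1
--             else:
--                 break
--         if l == r:
--             return s
--         bisect.insort(window, s)
--         del window[bisect.bisect_left(window, nums[i - k])]
-- ===== SOURCE B (Python) =====
-- from itertools import combinations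
--
-- def get_first_non_sum(nums, k):
--     for i in range(k, len(nums)):
--         s = nums[i]
--         window = nums[i - k:i]
--         if not any(x + y == s for x, y in combinations(window, 2)):
--             return s
--     return None
-- ===== Notes on version B (the rewrite author's own statement) =====
-- stated objective: simpler
-- what changed: Replaces A's incrementally maintained sorted window (bisect.insort/del) with a two-pointer scan per step by a plain unsorted slice nums[i-k:i] tested for a pair sum with itertools.combinations.
-- outside the precondition, e.g. on get_first_non_sum([5, 3], 0): A returns None, B returns 5; on get_first_non_sum([1, 2, 3], -1): A raises IndexError, B returns 1
import Mathlib
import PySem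

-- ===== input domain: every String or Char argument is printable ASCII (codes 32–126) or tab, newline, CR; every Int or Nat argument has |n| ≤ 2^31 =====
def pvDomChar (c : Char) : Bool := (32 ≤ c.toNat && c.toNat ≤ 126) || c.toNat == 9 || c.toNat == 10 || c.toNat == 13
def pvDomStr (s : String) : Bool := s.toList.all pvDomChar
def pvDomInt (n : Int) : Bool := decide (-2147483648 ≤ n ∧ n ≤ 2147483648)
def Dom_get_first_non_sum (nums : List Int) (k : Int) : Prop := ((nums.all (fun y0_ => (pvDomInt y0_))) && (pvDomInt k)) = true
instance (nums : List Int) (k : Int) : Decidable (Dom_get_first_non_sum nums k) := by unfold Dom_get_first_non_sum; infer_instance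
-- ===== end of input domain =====

-- B replaces A's sorted window + two-pointer + bisect bookkeeping by a plain unsorted
-- sliding slice tested with itertools.combinations; objective: simpler, not faster.

-- ===== PORT A =====
-- the `while l < r` two-pointer loop; returns the final (l, r)
def tpLoop (window : List Int) (s : Int) (l r : Int) : Int × Int :=
  if l < r then
    let cur := (PySem.List.pyGet? window l).getD 0 + (PySem.List.pyGet? window r).getD 0
    if cur < s then tpLoop window s (l + 1) r
    else if cur > s then tpLoop window s l (r - 1)
    else (l, r)
  else (l, r)
termination_by (r - l).toNat
decreasing_by all_goals omega

-- bisect.insort into the (sorted) window: insert after existing equal elements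
def insortRight (w : List Int) (x : Int) : List Int :=
  match w with
  | [] => [x]
  | a :: t => if x < a then x :: a :: t else a :: insortRight t x

-- del window[bisect.bisect_left(window, x)]: delete the first element ≥ x
-- (exact on sorted windows, which is the only state A's loop produces)
def delBisectLeft (w : List Int) (x : Int) : List Int :=
  match w with
  | [] => []
  | a :: t => if x ≤ a then t else a :: delBisectLeft t x

def aLoop (nums : List Int) (k : Int) (window : List Int) (is : List Int) : Option Int :=
  match is with
  | [] => none
  | i :: rest =>
    let s := (PySem.List.pyGet? nums i).getD 0
    let p := tpLoop window s 0 (k - 1)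
    if p.1 = p.2 then some s
    else
      aLoop nums k
        (delBisectLeft (insortRight window s) ((PySem.List.pyGet? nums (i - k)).getD 0)) rest

def get_first_non_sum (nums : List Int) (k : Int) : Option Int :=
  aLoop nums k (PySem.List.sorted (PySem.List.slice nums none (some k)) (fun x => x))
    (PySem.List.pyRange k nums.length 1)

-- ===== PORT B =====
-- itertools.combinations(window, 2)
def comb2 (l : List Int) : List (Int × Int) :=
  match l with
  | [] => []
  | a :: t => t.map (fun y => (a, y)) ++ comb2 t

def bLoop (nums : List Int) (k : Int) (is : List Int) : Option Int :=
  match is with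
  | [] => none
  | i :: rest =>
    let s := (PySem.List.pyGet? nums i).getD 0
    let window := PySem.List.slice nums (some (i - k)) (some i)
    if (comb2 window).any (fun p => p.1 + p.2 == s) then bLoop nums k rest
    else some s

def get_first_non_sum_alt (nums : List Int) (k : Int) : Option Int :=
  bLoop nums k (PySem.List.pyRange k nums.length 1)

-- ===== PRECONDITION & SPEC =====
-- Pre_ excludes k ≤ 0: a non-positive window size is degenerate — A raises IndexError for
-- negative k (negative-index slices/deletes), and at k = 0 A's "no return" (None) versus
-- B's vacuous "no pair sums to it" (the first element) are both accidental readings of an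
-- empty window, a corner no caller of this puzzle helper exercises.
def Pre_get_first_non_sum (nums : List Int) (k : Int) : Prop := 1 ≤ k
instance (nums : List Int) (k : Int) : Decidable (Pre_get_first_non_sum nums k) := by
  unfold Pre_get_first_non_sum; infer_instance

def pvWitness_get_first_non_sum : List Int × Int := ([20, 15, 25, 47, 40, 62], 3)

def Spec_get_first_non_sum (nums : List Int) (k : Int) (out : Option Int) : Prop :=
  out = get_first_non_sum_alt nums k
instance (nums : List Int) (k : Int) (out : Option Int) :
    Decidable (Spec_get_first_non_sum nums k out) := by
  unfold Spec_get_first_non_sum; infer_instance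

-- ===== CLAIM (what is proved, stated in full; the proofs are below) =====
def Claim_equal_get_first_non_sum : Prop :=
  ∀ (nums : List Int) (k : Int), Dom_get_first_non_sum nums k →
    Pre_get_first_non_sum nums k →
    Spec_get_first_non_sum nums k (get_first_non_sum nums k)

-- ===== LEMMAS AND PROOFS =====

-- "some pair of distinct positions of l sums to s"
def HasPair (l : List Int) (s : Int) : Prop := ∃ x y, [x, y].Sublist l ∧ x + y = s

theorem insort_perm (w : List Int) (x : Int) : (insortRight w x).Perm (x :: w) := by
  induction w with
  | nil => simp [insortRight]
  | cons a t ih =>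
    simp only [insortRight]
    split
    · exact List.Perm.refl _
    · exact (ih.cons a).trans (List.Perm.swap x a t)

theorem mem_insort (w : List Int) (x y : Int) :
    y ∈ insortRight w x ↔ y = x ∨ y ∈ w := by
  rw [(insort_perm w x).mem_iff]; simp

theorem insort_sorted (w : List Int) (x : Int) (hw : w.Pairwise (· ≤ ·)) :
    (insortRight w x).Pairwise (· ≤ ·) := by
  induction w with
  | nil => simp [insortRight]
  | cons a t ih =>
    rw [List.pairwise_cons] at hw
    simp only [insortRight]
    split
    · rename_i hlt
      refine List.pairwise_cons.2 ⟨?_, List.pairwise_cons.2 ⟨hw.1, hw.2⟩⟩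
      intro b hb
      rcases List.mem_cons.1 hb with h | h
      · omega
      · exact le_trans (le_of_lt hlt) (hw.1 b h)
    · rename_i hnlt
      refine List.pairwise_cons.2 ⟨?_, ih hw.2⟩
      intro b hb
      rcases (mem_insort t x b).1 hb with h | h
      · omega
      · exact hw.1 b h

theorem del_eq_erase (w : List Int) (x : Int) (hw : w.Pairwise (· ≤ ·)) (hx : x ∈ w) :
    delBisectLeft w x = w.erase x := by
  induction w with
  | nil => simp at hx
  | cons a t ih =>
    rw [List.pairwise_cons] at hw
    simp only [delBisectLeft]
    split
    · rename_i hle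
      have hax : a = x := by
        rcases List.mem_cons.1 hx with h | h
        · omega
        · have := hw.1 x h; omega
      rw [hax, List.erase_cons_head]
    · rename_i hgt
      have hax : a ≠ x := by omega
      have hxt : x ∈ t := by
        rcases List.mem_cons.1 hx with h | h
        · omega
        · exact h
      rw [List.erase_cons_tail (by simpa using hax), ih hw.2 hxt]

theorem mem_comb2 (l : List Int) (x y : Int) :
    (x, y) ∈ comb2 l ↔ [x, y].Sublist l := by
  induction l with
  | nil => simp [comb2]
  | cons a t ih =>
    simp only [comb2, List.mem_append, List.mem_map, List.sublist_cons_iff, ih]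
    constructor
    · rintro (⟨b, hb, heq⟩ | h)
      · have h1 : a = x := congrArg Prod.fst heq
        have h2 : b = y := congrArg Prod.snd heq
        exact Or.inr ⟨[y], by rw [← h1], by rw [h2] at hb; simpa using hb⟩
      · exact Or.inl h
    · rintro (h | ⟨r, hr, hs⟩)
      · exact Or.inr h
      · injection hr with h1 h2
        subst h1; subst h2
        exact Or.inl ⟨y, by simpa using hs, rfl⟩

theorem anyPair_iff (l : List Int) (s : Int) :
    ((comb2 l).any (fun p => p.1 + p.2 == s) = true) ↔ HasPair l s := by
  rw [List.any_eq_true]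
  constructor
  · rintro ⟨⟨x, y⟩, hmem, hsum⟩
    exact ⟨x, y, (mem_comb2 l x y).1 hmem, by simpa using hsum⟩
  · rintro ⟨x, y, hsub, hsum⟩
    exact ⟨(x, y), (mem_comb2 l x y).2 hsub, by simpa using hsum⟩

theorem pair_mem_mem (l : List Int) (x y : Int) (hne : x ≠ y) (hx : x ∈ l) (hy : y ∈ l) :
    [x, y].Sublist l ∨ [y, x].Sublist l := by
  induction l with
  | nil => simp at hx
  | cons a t ih =>
    rcases List.mem_cons.1 hx with rfl | hx'
    · have hyt : y ∈ t := by
        rcases List.mem_cons.1 hy with h | h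
        · exact absurd h.symm hne
        · exact h
      exact Or.inl (List.cons_sublist_cons.2 (List.singleton_sublist.2 hyt))
    · rcases List.mem_cons.1 hy with rfl | hy'
      · exact Or.inr (List.cons_sublist_cons.2 (List.singleton_sublist.2 hx'))
      · rcases ih hx' hy' with h | h
        · exact Or.inl (h.cons a)
        · exact Or.inr (h.cons a)

theorem hasPair_perm (l l' : List Int) (s : Int) (h : l.Perm l') (hp : HasPair l s) :
    HasPair l' s := by
  obtain ⟨x, y, hsub, hsum⟩ := hp
  by_cases hxy : x = y
  · subst hxy
    have hc : 2 ≤ l.count x := by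
      have := List.replicate_sublist_iff.1
        (show (List.replicate 2 x).Sublist l by simpa using hsub)
      simpa using this
    have hc' : 2 ≤ l'.count x := by rw [← h.count_eq]; exact hc
    exact ⟨x, x, by simpa using List.replicate_sublist_iff.2 hc', hsum⟩
  · have hx : x ∈ l' := h.mem_iff.1 (hsub.subset (by simp))
    have hy : y ∈ l' := h.mem_iff.1 (hsub.subset (by simp))
    rcases pair_mem_mem l' x y hxy hx hy with hs | hs
    · exact ⟨x, y, hs, hsum⟩
    · exact ⟨y, x, hs, by omega⟩

theorem pair_sublist_iff (w : List Int) (x y : Int) :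
    [x, y].Sublist w ↔ ∃ (i j : ℕ) (hi : i < w.length) (hj : j < w.length),
      i < j ∧ w[i] = x ∧ w[j] = y := by
  constructor
  · intro h
    induction w with
    | nil => simp at h
    | cons a t ih =>
      rcases List.sublist_cons_iff.1 h with h' | ⟨r, hr, hs⟩
      · obtain ⟨i, j, hi, hj, hij, hxi, hyj⟩ := ih h'
        exact ⟨i + 1, j + 1, by simpa using hi, by simpa using hj, by omega, by simpa using hxi,
          by simpa using hyj⟩
      · injection hr with h1 h2
        subst h1; subst h2
        have hyt : y ∈ t := by simpa using hs
        obtain ⟨j, hj, hyj⟩ := List.getElem_of_mem hyt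
        exact ⟨0, j + 1, by simp, by simpa using hj, by omega, by simp, by simpa using hyj⟩
  · rintro ⟨i, j, hi, hj, hij, rfl, rfl⟩
    have h1 : [w[i]].Sublist (w.take j) := by
      apply List.singleton_sublist.2
      rw [List.mem_take_iff_getElem]
      exact ⟨i, by omega, by simp⟩
    have h2 : [w[j]].Sublist (w.drop j) := by
      apply List.singleton_sublist.2
      rw [List.mem_iff_getElem]
      exact ⟨0, by simp [Nat.sub_pos_of_lt hj], by simp⟩
    have := List.Sublist.append h1 h2
    simpa [List.take_append_drop] using this

theorem sorted_le_of_le (w : List Int) (hw : w.Pairwise (· ≤ ·)) (i j : ℕ)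
    (hij : i ≤ j) (hj : j < w.length) : w[i]'(by omega) ≤ w[j] := by
  rcases Nat.lt_or_eq_of_le hij with h | h
  · exact List.pairwise_iff_getElem.1 hw i j (by omega) hj h
  · subst h; exact le_refl _

theorem tp_iff (w : List Int) (s : Int) (hw : w.Pairwise (· ≤ ·)) :
    ∀ (n : ℕ) (l r : Int), (r - l).toNat ≤ n → 0 ≤ l → l ≤ r → r < (w.length : Int) →
      ((tpLoop w s l r).1 = (tpLoop w s l r).2 ↔
        ¬ ∃ (i j : ℕ) (hi : i < w.length) (hj : j < w.length),
            l ≤ (i : Int) ∧ i < j ∧ (j : Int) ≤ r ∧ w[i] + w[j] = s) := by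
  intro n
  induction n with
  | zero =>
    intro l r hn h0 hlr hrlen
    have hlr' : l = r := by omega
    rw [tpLoop]
    rw [if_neg (by omega : ¬ l < r)]
    refine iff_of_true (by simpa using hlr') ?_
    rintro ⟨i, j, hi, hj, h1, h2, h3, _⟩
    omega
  | succ n ih =>
    intro l r hn h0 hlr hrlen
    by_cases hltr : l < r
    · have hbl : l.toNat < w.length := by omega
      have hbr : r.toNat < w.length := by omega
      have e1 : PySem.List.pyGet? w l = some (w[l.toNat]'hbl) := by
        conv_lhs => rw [← Int.toNat_of_nonneg h0]
        rw [PySem.List.pyGet?_natCast]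
        exact List.getElem?_eq_getElem hbl
      have e2 : PySem.List.pyGet? w r = some (w[r.toNat]'hbr) := by
        conv_lhs => rw [← Int.toNat_of_nonneg (by omega : (0:Int) ≤ r)]
        rw [PySem.List.pyGet?_natCast]
        exact List.getElem?_eq_getElem hbr
      rw [tpLoop]
      rw [if_pos hltr]
      simp only [e1, e2, Option.getD_some]
      by_cases hcs : w[l.toNat]'hbl + w[r.toNat]'hbr < s
      · rw [if_pos hcs]
        rw [ih (l + 1) r (by omega) (by omega) (by omega) hrlen]
        apply not_congr
        constructor
        · rintro ⟨i, j, hi, hj, h1, h2, h3, h4⟩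
          exact ⟨i, j, hi, hj, by omega, h2, h3, h4⟩
        · rintro ⟨i, j, hi, hj, h1, h2, h3, h4⟩
          by_cases hli : l + 1 ≤ (i : Int)
          · exact ⟨i, j, hi, hj, hli, h2, h3, h4⟩
          · exfalso
            have hieq : i = l.toNat := by omega
            simp only [hieq] at h4
            have hmono : w[j] ≤ w[r.toNat]'hbr :=
              sorted_le_of_le w hw j r.toNat (by omega) hbr
            linarith
      · by_cases hgs : w[l.toNat]'hbl + w[r.toNat]'hbr > s
        · rw [if_neg hcs, if_pos hgs]
          rw [ih l (r - 1) (by omega) h0 (by omega) (by omega)]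
          apply not_congr
          constructor
          · rintro ⟨i, j, hi, hj, h1, h2, h3, h4⟩
            exact ⟨i, j, hi, hj, h1, h2, by omega, h4⟩
          · rintro ⟨i, j, hi, hj, h1, h2, h3, h4⟩
            by_cases hjr : (j : Int) ≤ r - 1
            · exact ⟨i, j, hi, hj, h1, h2, hjr, h4⟩
            · exfalso
              have hjeq : j = r.toNat := by omega
              simp only [hjeq] at h4
              have hmono : w[l.toNat]'hbl ≤ w[i] :=
                sorted_le_of_le w hw l.toNat i (by omega) hi
              linarith
        · have heq : w[l.toNat]'hbl + w[r.toNat]'hbr = s := by linarith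
          rw [if_neg hcs, if_neg hgs]
          refine iff_of_false (by simpa using (by omega : l ≠ r)) (not_not_intro ?_)
          exact ⟨l.toNat, r.toNat, hbl, hbr, by omega, by omega, by omega, heq⟩
    · have hlr' : l = r := by omega
      rw [tpLoop, if_neg hltr]
      refine iff_of_true (by simpa using hlr') ?_
      rintro ⟨i, j, hi, hj, h1, h2, h3, _⟩
      omega

-- A's two-pointer over the whole sorted window decides HasPair
theorem tp_full (w : List Int) (s : Int) (hw : w.Pairwise (· ≤ ·)) (hlen : 1 ≤ w.length) :
    ((tpLoop w s 0 ((w.length : Int) - 1)).1 = (tpLoop w s 0 ((w.length : Int) - 1)).2 ↔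
      ¬ HasPair w s) := by
  rw [tp_iff w s hw ((w.length : Int) - 1 - 0).toNat 0 ((w.length : Int) - 1)
    (le_refl _) (le_refl _) (by omega) (by omega)]
  apply not_congr
  constructor
  · rintro ⟨i, j, hi, hj, _, h2, _, h4⟩
    exact ⟨w[i], w[j], (pair_sublist_iff w _ _).2 ⟨i, j, hi, hj, h2, rfl, rfl⟩, h4⟩
  · rintro ⟨x, y, hsub, hsum⟩
    obtain ⟨i, j, hi, hj, hij, hxi, hyj⟩ := (pair_sublist_iff w x y).1 hsub
    exact ⟨i, j, hi, hj, by omega, hij, by omega, by rw [hxi, hyj]; exact hsum⟩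

-- one window-slide step of A preserves "sorted and a permutation of the current slice"
theorem window_step (nums : List Int) (a K m : ℕ) (hK : 1 ≤ K) (hm : a + K = m)
    (h : m < nums.length) (w : List Int) (hsort : w.Pairwise (· ≤ ·))
    (hperm : w.Perm ((nums.drop a).take K)) :
    (delBisectLeft (insortRight w (nums[m]'h)) (nums[a]'(by omega))).Pairwise (· ≤ ·) ∧
    (delBisectLeft (insortRight w (nums[m]'h)) (nums[a]'(by omega))).Perm
      ((nums.drop (a + 1)).take K) := by
  have ha : a < nums.length := by omega
  have hdecomp : (nums.drop a).take K = nums[a]'ha :: (nums.drop (a + 1)).take (K - 1) := by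
    conv_lhs => rw [List.drop_eq_getElem_cons ha, show K = (K - 1) + 1 from by omega]
    rw [List.take_succ_cons]
  have hold : nums[a]'ha ∈ w := hperm.mem_iff.2 (by rw [hdecomp]; exact List.mem_cons_self ..)
  have hins : (insortRight w (nums[m]'h)).Pairwise (· ≤ ·) := insort_sorted _ _ hsort
  have holdins : nums[a]'ha ∈ insortRight w (nums[m]'h) :=
    (mem_insort _ _ _).2 (Or.inr hold)
  have hdel := del_eq_erase _ (nums[a]'ha) hins holdins
  constructor
  · rw [hdel]
    exact hins.sublist (List.erase_sublist ..)
  · rw [hdel]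
    have p1 : ((insortRight w (nums[m]'h)).erase (nums[a]'ha)).Perm
        ((nums[m]'h :: nums[a]'ha :: (nums.drop (a + 1)).take (K - 1)).erase (nums[a]'ha)) :=
      List.Perm.erase _ ((insort_perm w _).trans ((hperm.trans (by rw [hdecomp])).cons _))
    have p2 : ((nums[m]'h :: nums[a]'ha :: (nums.drop (a + 1)).take (K - 1)).erase
        (nums[a]'ha)).Perm (nums[m]'h :: (nums.drop (a + 1)).take (K - 1)) := by
      by_cases hso : nums[m]'h = nums[a]'ha
      · rw [hso, List.erase_cons_head]
      · rw [List.erase_cons_tail (by simpa using hso), List.erase_cons_head]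
    have p3 : (nums.drop (a + 1)).take K =
        (nums.drop (a + 1)).take (K - 1) ++ [nums[m]'h] := by
      rw [show K = (K - 1) + 1 from by omega, List.take_add_one]
      congr 1
      rw [List.getElem?_drop, show a + 1 + (K - 1) = m from by omega,
        List.getElem?_eq_getElem h]
      rfl
    rw [p3]
    exact p1.trans (p2.trans (List.perm_append_singleton _ _).symm)


theorem loop_eq (nums : List Int) (k : Int) (hk : 1 ≤ k) :
    ∀ (n : ℕ) (i : Int) (w : List Int), k ≤ i → (nums.length : Int) - i ≤ n →
      w.Pairwise (· ≤ ·) → w.Perm (PySem.List.slice nums (some (i - k)) (some i)) →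
      aLoop nums k w (PySem.List.pyRange i nums.length 1) =
        bLoop nums k (PySem.List.pyRange i nums.length 1) := by
  intro n
  induction n with
  | zero =>
    intro i w hki hn _ _
    rw [PySem.List.pyRange_one_eq_nil (by omega)]
    rfl
  | succ n ih =>
    intro i w hki hn hsort hperm
    by_cases hil : i < (nums.length : Int)
    · rw [PySem.List.pyRange_one_cons hil]
      have hmlen : i.toNat < nums.length := by omega
      have es : PySem.List.pyGet? nums i = some (nums[i.toNat]'hmlen) := by
        conv_lhs => rw [← Int.toNat_of_nonneg (by omega : (0:Int) ≤ i)]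
        rw [PySem.List.pyGet?_natCast]
        exact List.getElem?_eq_getElem hmlen
      have ha : (i - k).toNat < nums.length := by omega
      have eo : PySem.List.pyGet? nums (i - k) = some (nums[(i - k).toNat]'ha) := by
        conv_lhs => rw [← Int.toNat_of_nonneg (by omega : (0:Int) ≤ i - k)]
        rw [PySem.List.pyGet?_natCast]
        exact List.getElem?_eq_getElem ha
      have hsl : PySem.List.slice nums (some (i - k)) (some i) =
          (nums.drop (i - k).toNat).take k.toNat := by
        rw [PySem.List.slice_toNat nums (by omega) (by omega)]
        rw [show i.toNat - (i - k).toNat = k.toNat from by omega]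
      rw [hsl] at hperm
      have hwlen : w.length = k.toNat := by
        rw [hperm.length_eq]
        simp only [List.length_take, List.length_drop]
        omega
      rw [aLoop, bLoop]
      simp only [es, eo, Option.getD_some, hsl]
      rw [show k - 1 = (w.length : Int) - 1 from by omega]
      have htp := tp_full w (nums[i.toNat]'hmlen) hsort (by omega)
      have hbp : ((comb2 ((nums.drop (i - k).toNat).take k.toNat)).any
          (fun p => p.1 + p.2 == nums[i.toNat]'hmlen) = true) ↔
          HasPair w (nums[i.toNat]'hmlen) := by
        rw [anyPair_iff]
        exact ⟨fun h => hasPair_perm _ _ _ hperm.symm h, fun h => hasPair_perm _ _ _ hperm h⟩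
      obtain ⟨hs1, hs2⟩ := window_step nums (i - k).toNat k.toNat i.toNat (by omega)
        (by omega) hmlen w hsort hperm
      have hsl2 : PySem.List.slice nums (some (i + 1 - k)) (some (i + 1)) =
          (nums.drop ((i - k).toNat + 1)).take k.toNat := by
        rw [PySem.List.slice_toNat nums (by omega) (by omega)]
        rw [show (i + 1 - k).toNat = (i - k).toNat + 1 from by omega]
        rw [show (i + 1).toNat - ((i - k).toNat + 1) = k.toNat from by omega]
      by_cases hp : HasPair w (nums[i.toNat]'hmlen)
      · rw [if_neg (fun hcontra => (htp.1 hcontra) hp), if_pos (hbp.2 hp)]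
        exact ih (i + 1) _ (by omega) (by omega) hs1 (by rw [hsl2]; exact hs2)
      · rw [if_pos (htp.2 hp), if_neg (fun hcontra => hp (hbp.1 hcontra))]
    · rw [PySem.List.pyRange_one_eq_nil (by omega)]
      rfl

-- ===== VERDICT (by name: the statement is the Claim_ definition above) =====
theorem get_first_non_sum_spec : Claim_equal_get_first_non_sum := by
  intro nums k _ hk
  show get_first_non_sum nums k = get_first_non_sum_alt nums k
  unfold get_first_non_sum get_first_non_sum_alt
  apply loop_eq nums k hk ((nums.length : Int) - k).toNat k _ (le_refl k) (by omega)
  · simpa using PySem.List.sorted_pairwise (PySem.List.slice nums none (some k)) (fun x => x)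
  · rw [sub_self, PySem.List.slice_zero_start]
    exact PySem.List.sorted_perm _ _ _
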